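-- pv_equiv track=rewrite | github.com/zzandland/Algo-DS | Python/Amazon_2020_03/treasure_island2.py | treasureIsland2
-- ===== SOURCE A (Python) =====
-- from typing import List
--
-- def treasureIsland2(matrix: List[List[str]]) -> int:
--     '''
--     >>> treasureIsland2(matrix)
--     3
--     '''
--     if not matrix: return -1
--     M, N, dir_ = len(matrix), len(matrix[0]), [(1, 0), (-1, 0), (0, 1), (0, -1)]
--     cnt = 0
--
--     # get all starting coords O(matrix)
--     q = []
--     for y in range(M):
--         for x in range(N):
--             if matrix[y][x] == 'S':
--                 matrix[y][x] = 'D'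
--                 q.append((y, x))
--
--     # bfs until any treasure is found O(matrix)
--     while q:
--         nq = []
--         cnt += 1
--         for y, x in q:
--             for ny, nx in ((y+r, x+c) for r, c in dir_):
--                 if 0 <= ny < M and 0 <= nx < N:
--                     if matrix[ny][nx] == 'X': return cnt
--                     if matrix[ny][nx] == 'O':
--                         matrix[ny][nx] = 'D'
--                         nq.append((ny, nx))
--         q = nq
--     return -1
-- ===== SOURCE B (Python) =====
-- from typing import List
--
-- def treasureIsland2(matrix: List[List[str]]) -> int:
--     # Frontier-free "pull" flood: no BFS queue and no grid mutation.  A reached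
--     # SET holds the flooded region; each round rescans the whole grid and asks
--     # every 'X'/'O' cell whether it touches the region, instead of pushing out
--     # from a frontier.  Return-value equivalence only: unlike A, B does not
--     # mutate the matrix.
--     if not matrix: return -1
--     M, N = len(matrix), len(matrix[0])
--     reached = {(y, x) for y in range(M) for x in range(N) if matrix[y][x] == 'S'}
--     cnt = 0
--     while True:
--         cnt += 1
--         hit = False
--         newly = []
--         for y in range(M):
--             for x in range(N):
--                 c = matrix[y][x]
--                 if c == 'X' or (c == 'O' and (y, x) not in reached):
--                     for ny, nx in ((y + 1, x), (y - 1, x), (y, x + 1), (y, x - 1)):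
--                         if 0 <= ny < M and 0 <= nx < N and (ny, nx) in reached:
--                             if c == 'X':
--                                 hit = True
--                             else:
--                                 newly.append((y, x))
--                             break
--         if hit:
--             return cnt
--         if not newly:
--             return -1
--         reached.update(newly)
-- ===== Notes on version B (the rewrite author's own statement) =====
-- stated objective: alternative
-- what changed: Replaces A's push-style frontier BFS (queue of frontier cells, in-place 'D' marking, per-level list swap) by a frontier-free pull-style flood: a set of reached coordinates, and each round a full-grid rescan in which every 'X'/'O' cell asks whether one of its neighbours is already reached; no queue and no mutation of the matrix (return-value equivalence only). Pre_ excludes ragged matrices whose first row is longer than some later row, on which both A and B raise IndexError.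
import Mathlib
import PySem

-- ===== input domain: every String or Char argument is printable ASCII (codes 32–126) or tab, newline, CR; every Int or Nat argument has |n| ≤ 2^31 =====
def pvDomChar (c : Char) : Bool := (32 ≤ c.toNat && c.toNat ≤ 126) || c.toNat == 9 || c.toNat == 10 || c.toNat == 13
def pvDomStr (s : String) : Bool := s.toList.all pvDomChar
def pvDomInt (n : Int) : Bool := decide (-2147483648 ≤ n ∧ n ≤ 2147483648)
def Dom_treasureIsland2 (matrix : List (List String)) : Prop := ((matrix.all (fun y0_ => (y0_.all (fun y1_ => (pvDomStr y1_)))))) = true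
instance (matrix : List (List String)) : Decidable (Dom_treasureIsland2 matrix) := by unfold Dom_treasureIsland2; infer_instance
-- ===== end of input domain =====

-- B replaces A's push-style frontier BFS (queue of frontier cells, in-place 'D'
-- marking, per-level list swap) by a frontier-free pull-style flood: a set of
-- reached coordinates and, each round, a full-grid rescan in which every
-- 'X'/'O' cell asks whether one of its neighbours is already reached.
-- A mutates `matrix` in place and B does not: the equivalence proved here is
-- about the RETURN value only.

-- Shared cell primitives: Python's `matrix[y][x]` read and `matrix[y][x] = v`
-- write for a 0 ≤ index (exact on Pre_, where every accessed index is in range).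
def pvGet (g : List (List String)) (y x : Int) : String :=
  (g.getD y.toNat []).getD x.toNat ""

def pvSet (g : List (List String)) (y x : Int) (v : String) : List (List String) :=
  g.set y.toNat ((g.getD y.toNat []).set x.toNat v)

-- number of 'O' cells: the termination measure of A's BFS loop
def countO (g : List (List String)) : Nat := (g.map (fun r => r.count "O")).sum

-- the next three lemmas are cited by port A's `decreasing_by` proof
theorem count_set_O (l : List String) (i : Nat) (h : l.getD i "" = "O") :
    (l.set i "D").count "O" + 1 = l.count "O" := by
  induction l generalizing i with
  | nil => simp at h
  | cons a t ih =>
    cases i with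
    | zero => simp at h; simp [h]
    | succ j =>
      simp only [List.getD_cons_succ] at h
      simp [List.count_cons, ← ih j h]
      omega

theorem sum_map_set (g : List (List String)) (i : Nat) (r : List String)
    (hi : i < g.length) :
    ((g.set i r).map (fun r => r.count "O")).sum + (g.getD i []).count "O"
      = (g.map (fun r => r.count "O")).sum + r.count "O" := by
  induction g generalizing i with
  | nil => simp at hi
  | cons a t ih =>
    cases i with
    | zero => simp [List.set]; omega
    | succ j =>
      simp only [List.set, List.map_cons, List.sum_cons, List.getD_cons_succ]
      have := ih j (by simpa using hi)
      omega

theorem countO_set (g : List (List String)) (y x : Int) (h : pvGet g y x = "O") :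
    countO (pvSet g y x "D") + 1 = countO g := by
  have hi : y.toNat < g.length := by
    rcases Nat.lt_or_ge y.toNat g.length with h' | h'
    · exact h'
    · exfalso
      unfold pvGet at h
      rw [List.getD_eq_default _ _ h'] at h
      simp at h
  have h2 := count_set_O (g.getD y.toNat []) x.toNat h
  have h3 := sum_map_set g y.toNat ((g.getD y.toNat []).set x.toNat "D") hi
  simp only [countO, pvSet]
  omega

-- ===== PORT A =====
-- A's neighbor-offset list dir_
def dirListA : List (Int × Int) := [(1, 0), (-1, 0), (0, 1), (0, -1)]

-- state of A's inner level scan: early `return cnt` (found) or (grid, nq)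
inductive StA where
  | found : StA
  | go : List (List String) → List (Int × Int) → StA

-- one neighbor (ny, nx) = (y + r, x + c) of A's generator
def visA (M N y x : Int) (st : StA) (rc : Int × Int) : StA :=
  match st with
  | .found => .found
  | .go g nq =>
    if 0 ≤ y + rc.1 ∧ y + rc.1 < M ∧ 0 ≤ x + rc.2 ∧ x + rc.2 < N then
      if pvGet g (y + rc.1) (x + rc.2) = "X" then .found
      else if pvGet g (y + rc.1) (x + rc.2) = "O" then
        .go (pvSet g (y + rc.1) (x + rc.2) "D") (nq ++ [(y + rc.1, x + rc.2)])
      else .go g nq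
    else .go g nq

-- A's `for y, x in q` body
def cellA (M N : Int) (st : StA) (p : Int × Int) : StA :=
  List.foldl (visA M N p.1 p.2) st dirListA

def measA : StA → Nat
  | .found => 0
  | .go g nq => countO g + nq.length

theorem visA_meas (M N y x : Int) (st : StA) (rc : Int × Int) :
    measA (visA M N y x st rc) ≤ measA st := by
  cases st with
  | found => simp [visA]
  | go g nq =>
    simp only [visA]
    split_ifs with h1 h2 h3
    · simp [measA]
    · have := countO_set g (y + rc.1) (x + rc.2) h3
      simp [measA]; omega
    · exact le_refl _
    · exact le_refl _

theorem foldl_visA_meas (M N y x : Int) (l : List (Int × Int)) (st : StA) :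
    measA (List.foldl (visA M N y x) st l) ≤ measA st := by
  induction l generalizing st with
  | nil => simp
  | cons a t ih => exact le_trans (ih _) (visA_meas M N y x st a)

theorem level_meas (M N : Int) (q : List (Int × Int)) (st : StA) :
    measA (List.foldl (cellA M N) st q) ≤ measA st := by
  induction q generalizing st with
  | nil => simp
  | cons p t ih => exact le_trans (ih _) (foldl_visA_meas M N p.1 p.2 dirListA st)

-- A's `while q:` loop, `cnt` threaded as an argument
def loopA (M N : Int) (g : List (List String)) (q : List (Int × Int)) (cnt : Int) : Int :=
  if q.isEmpty then -1
  else
    match h : List.foldl (cellA M N) (StA.go g []) q with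
    | .found => cnt + 1
    | .go g' nq => loopA M N g' nq (cnt + 1)
termination_by countO g + (if q.isEmpty then 0 else 1)
decreasing_by
  have h2 := level_meas M N q (StA.go g [])
  rw [h] at h2
  simp [measA] at h2 ⊢
  cases nq <;> simp_all <;> omega

-- A's initial scan: one row `for x in range(N)`, appending (y, x) pairs to q
def scanRowA (N y : Int) (st : List (List String) × List (Int × Int)) :
    List (List String) × List (Int × Int) :=
  (PySem.List.pyRange 0 N 1).foldl (fun st x =>
    if pvGet st.1 y x = "S" then (pvSet st.1 y x "D", st.2 ++ [(y, x)]) else st) st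

def treasureIsland2 (matrix : List (List String)) : Int :=
  if matrix.isEmpty then -1
  else
    let M : Int := matrix.length
    let N : Int := (matrix.getD 0 []).length
    let s := (PySem.List.pyRange 0 M 1).foldl (fun st y => scanRowA N y st) (matrix, [])
    loopA M N s.1 s.2 0

-- ===== PORT B =====
-- B's literal 4-tuple of neighbours of (y, x)
def nbrsB (y x : Int) : List (Int × Int) :=
  [(y + 1, x), (y - 1, x), (y, x + 1), (y, x - 1)]

-- B's set comprehension: reached = {(y, x) | matrix[y][x] == 'S'}
def bInit (M N : Int) (g : List (List String)) : PySem.Set (Int × Int) :=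
  (PySem.List.pyRange 0 M 1).foldl (fun s y =>
    (PySem.List.pyRange 0 N 1).foldl (fun s x =>
      if pvGet g y x = "S" then PySem.Set.add s (y, x) else s) s) PySem.Set.empty

-- B's inner neighbour loop with `break`: does some in-bounds neighbour lie in `reached`?
def bHasNbr (M N : Int) (reached : PySem.Set (Int × Int)) (y x : Int) : Bool :=
  (nbrsB y x).any (fun p =>
    decide (0 ≤ p.1 ∧ p.1 < M ∧ 0 ≤ p.2 ∧ p.2 < N) && PySem.Set.contains reached p)

-- B's per-cell body of the grid rescan
def bStep (M N : Int) (g : List (List String)) (reached : PySem.Set (Int × Int)) (y : Int)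
    (acc : Bool × List (Int × Int)) (x : Int) : Bool × List (Int × Int) :=
  if pvGet g y x = "X" ∨ (pvGet g y x = "O" ∧ PySem.Set.contains reached (y, x) = false) then
    if bHasNbr M N reached y x = true then
      if pvGet g y x = "X" then (true, acc.2) else (acc.1, acc.2 ++ [(y, x)])
    else acc
  else acc

-- one row of B's rescan
def bRow (M N : Int) (g : List (List String)) (reached : PySem.Set (Int × Int)) (y : Int)
    (acc : Bool × List (Int × Int)) : Bool × List (Int × Int) :=
  (PySem.List.pyRange 0 N 1).foldl (bStep M N g reached y) acc

-- one full round: (hit, newly)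
def bRound (M N : Int) (g : List (List String)) (reached : PySem.Set (Int × Int)) :
    Bool × List (Int × Int) :=
  (PySem.List.pyRange 0 M 1).foldl (fun acc y => bRow M N g reached y acc) (false, [])

-- cells of the M×N scanning rectangle (termination measure support)
def allCells (M N : Int) : List (Int × Int) :=
  (PySem.List.pyRange 0 M 1).flatMap (fun y => (PySem.List.pyRange 0 N 1).map (fun x => (y, x)))

-- the next three lemmas are cited by port B's `decreasing_by` proof
theorem foldl_bStep_mem (M N : Int) (g : List (List String)) (reached : PySem.Set (Int × Int))
    (y : Int) (xs : List Int) (acc : Bool × List (Int × Int)) (c : Int × Int)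
    (hc : c ∈ (xs.foldl (bStep M N g reached y) acc).2) :
    c ∈ acc.2 ∨ ∃ x ∈ xs, c = (y, x) ∧ pvGet g y x = "O" ∧
      PySem.Set.contains reached (y, x) = false := by
  induction xs generalizing acc with
  | nil => exact Or.inl hc
  | cons x t ih =>
    rw [List.foldl_cons] at hc
    rcases ih _ hc with h | ⟨x', hx', hrest⟩
    · simp only [bStep] at h
      split_ifs at h with h1 h2 h3
      · exact Or.inl h
      · rcases List.mem_append.1 h with h4 | h4
        · exact Or.inl h4
        · rcases h1 with h1 | ⟨h1, h1'⟩
          · exact absurd h1 h3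
          · exact Or.inr ⟨x, List.mem_cons_self, by simpa using h4, h1, h1'⟩
      · exact Or.inl h
      · exact Or.inl h
    · exact Or.inr ⟨x', List.mem_cons_of_mem _ hx', hrest⟩

theorem bRound_mem (M N : Int) (g : List (List String)) (reached : PySem.Set (Int × Int))
    (c : Int × Int) (hc : c ∈ (bRound M N g reached).2) :
    c ∈ allCells M N ∧ pvGet g c.1 c.2 = "O" ∧ PySem.Set.contains reached c = false := by
  unfold bRound at hc
  suffices h : ∀ (ys : List Int) (hys : ∀ y ∈ ys, 0 ≤ y ∧ y < M)
      (acc : Bool × List (Int × Int)),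
      c ∈ (ys.foldl (fun acc y => bRow M N g reached y acc) acc).2 →
      c ∈ acc.2 ∨ (c ∈ allCells M N ∧ pvGet g c.1 c.2 = "O" ∧
        PySem.Set.contains reached c = false) by
    rcases h (PySem.List.pyRange 0 M 1)
        (fun y hy => by simpa using (PySem.List.mem_pyRange_one.1 hy)) (false, []) hc with h | h
    · simp at h
    · exact h
  intro ys
  induction ys with
  | nil => intro _ acc h; exact Or.inl h
  | cons y t ih =>
    intro hys acc h
    rw [List.foldl_cons] at h
    rcases ih (fun z hz => hys z (List.mem_cons_of_mem _ hz)) _ h with h | h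
    · unfold bRow at h
      rcases foldl_bStep_mem M N g reached y _ _ _ h with h2 | ⟨x, hx, hcx, ho, hr⟩
      · exact Or.inl h2
      · refine Or.inr ⟨?_, by rw [hcx]; exact ho, by rw [hcx]; exact hr⟩
        subst hcx
        simp only [allCells, List.mem_flatMap, List.mem_map]
        exact ⟨y, PySem.List.mem_pyRange_one.2 (by have := hys y List.mem_cons_self; omega),
          x, hx, rfl⟩
    · exact Or.inr h

theorem countP_lt_of {α : Type} (l : List α) (p q : α → Bool)
    (hmono : ∀ a ∈ l, q a = true → p a = true) (a : α) (ha : a ∈ l)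
    (hp : p a = true) (hq : q a = false) : l.countP q < l.countP p := by
  induction l with
  | nil => simp at ha
  | cons b t ih =>
    rw [List.countP_cons, List.countP_cons]
    rcases List.mem_cons.1 ha with rfl | ha'
    · have hle : t.countP q ≤ t.countP p :=
        List.countP_mono_left (fun z hz => hmono z (List.mem_cons_of_mem _ hz))
      rw [hp, hq]; simp; omega
    · have hlt := ih (fun z hz => hmono z (List.mem_cons_of_mem _ hz)) ha'
      have : (if q b = true then 1 else 0) ≤ (if p b = true then 1 else 0) := by
        by_cases hb : q b = true
        · rw [hb, hmono b List.mem_cons_self hb]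
        · simp [hb]
      omega

-- B's `while True:` loop, `cnt` threaded as an argument
def loopB (M N : Int) (g : List (List String)) (reached : PySem.Set (Int × Int))
    (cnt : Int) : Int :=
  if (bRound M N g reached).1 = true then cnt + 1
  else if (bRound M N g reached).2.isEmpty = true then -1
  else loopB M N g (PySem.Set.update reached (bRound M N g reached).2) (cnt + 1)
termination_by (allCells M N).countP (fun c => !(PySem.Set.contains reached c))
decreasing_by
  rename_i _h1 h2
  have hne : (bRound M N g reached).2 ≠ [] := by
    intro h; rw [h] at h2; simp at h2
  obtain ⟨c0, hc0⟩ := List.exists_mem_of_ne_nil _ hne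
  obtain ⟨hall, _, hcont⟩ := bRound_mem M N g reached c0 hc0
  refine countP_lt_of _ _ _ ?_ c0 hall (by simp at hcont ⊢; exact hcont) ?_
  · intro a _ haq
    simp only [Bool.not_eq_true', ← Bool.not_eq_true, PySem.Set.contains_iff] at haq ⊢
    intro hmem
    exact haq (by rw [PySem.Set.mem_update]; exact Or.inl hmem)
  · simp only [Bool.not_eq_true', ← Bool.not_eq_true, PySem.Set.contains_iff]
    simp only [Decidable.not_not]
    rw [PySem.Set.mem_update]
    exact Or.inr hc0

def treasureIsland2_alt (matrix : List (List String)) : Int :=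
  if matrix.isEmpty then -1
  else
    let M : Int := matrix.length
    let N : Int := (matrix.getD 0 []).length
    loopB M N matrix (bInit M N matrix) 0

-- ===== PRECONDITION & SPEC =====
-- Pre_ excludes exactly the ragged matrices whose first row is longer than some
-- later row: there A's initial scan raises IndexError (and so does B's).
def Pre_treasureIsland2 (matrix : List (List String)) : Prop :=
  ∀ row ∈ matrix, (matrix.getD 0 []).length ≤ row.length

instance (matrix : List (List String)) : Decidable (Pre_treasureIsland2 matrix) := by
  unfold Pre_treasureIsland2; infer_instance

def pvWitness_treasureIsland2 : List (List String) :=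
  [["S", "O", "O"], ["D", "D", "O"], ["X", "O", "O"]]

def Spec_treasureIsland2 (matrix : List (List String)) (out : Int) : Prop := out = treasureIsland2_alt matrix
instance (matrix : List (List String)) (out : Int) : Decidable (Spec_treasureIsland2 matrix out) := by unfold Spec_treasureIsland2; infer_instance

-- ===== CLAIM (what is proved, stated in full; the proofs are below) =====
def Claim_equal_treasureIsland2 : Prop := ∀ (matrix : List (List String)), Dom_treasureIsland2 matrix → Pre_treasureIsland2 matrix → Spec_treasureIsland2 matrix (treasureIsland2 matrix)

-- ===== LEMMAS AND PROOFS =====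

-- in-bounds predicate for the M×N rectangle
def InB (M N y x : Int) : Prop := 0 ≤ y ∧ y < M ∧ 0 ≤ x ∧ x < N

-- `g'` is `base` with exactly the cells of `marks` (all reading `ch` in `base`)
-- overwritten by "D"
def Marked (M N : Int) (base g' : List (List String)) (marks : List (Int × Int))
    (ch : String) : Prop :=
  (∀ y x : Int, 0 ≤ y → 0 ≤ x →
    pvGet g' y x = if (y, x) ∈ marks then "D" else pvGet base y x) ∧
  (∀ c ∈ marks, InB M N c.1 c.2 ∧ pvGet base c.1 c.2 = ch)

theorem pvGet_shape (g : List (List String)) (y x : Int) (h : pvGet g y x ≠ "") :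
    y.toNat < g.length ∧ x.toNat < (g.getD y.toNat []).length := by
  unfold pvGet at h
  constructor
  · by_contra hy
    have hrow : g.getD y.toNat [] = [] := List.getD_eq_default _ _ (by omega)
    rw [hrow] at h
    simp at h
  · by_contra hx
    exact h (List.getD_eq_default _ _ (by omega))

theorem pvGet_pvSet (g : List (List String)) (a b y x : Int) (v : String)
    (ha : a.toNat < g.length) (hb : b.toNat < (g.getD a.toNat []).length) :
    pvGet (pvSet g a b v) y x =
      if y.toNat = a.toNat ∧ x.toNat = b.toNat then v else pvGet g y x := by
  unfold pvGet pvSet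
  by_cases hy : y.toNat = a.toNat
  · have hrow : (g.set a.toNat ((g.getD a.toNat []).set b.toNat v)).getD a.toNat [] = (g.getD a.toNat []).set b.toNat v := by
      unfold List.getD
      rw [List.getElem?_set_self (by omega)]
      rfl
    rw [hy, hrow]
    by_cases hx : x.toNat = b.toNat
    · rw [hx]
      have : ((g.getD a.toNat []).set b.toNat v).getD b.toNat "" = v := by
        unfold List.getD
        rw [List.getElem?_set_self (by simp only [List.getD] at hb; omega)]
        rfl
      rw [this]
      simp
    · have : ((g.getD a.toNat []).set b.toNat v).getD x.toNat "" = (g.getD a.toNat []).getD x.toNat "" := by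
        unfold List.getD
        rw [List.getElem?_set_ne (by omega)]
      rw [this]
      simp [hx]
  · rw [show ((g.set a.toNat ((g.getD a.toNat []).set b.toNat v)).getD y.toNat []) = g.getD y.toNat [] by
      unfold List.getD; rw [List.getElem?_set_ne (by omega)]]
    simp [hy]

theorem nbrsB_symm (y x : Int) (m : Int × Int) (h : m ∈ nbrsB y x) :
    (y, x) ∈ nbrsB m.1 m.2 := by
  simp only [nbrsB, List.mem_cons, List.not_mem_nil, or_false] at h ⊢
  rcases h with h | h | h | h <;> subst h <;> simp

-- marking one fresh ch-cell extends Marked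
theorem marked_mark (M N : Int) (base g' : List (List String)) (marks : List (Int × Int))
    (ch : String) (h : Marked M N base g' marks ch) (a b : Int)
    (hin : InB M N a b) (hv : pvGet base a b = ch) (hnm : (a, b) ∉ marks)
    (hch : ch ≠ "") :
    Marked M N base (pvSet g' a b "D") (marks ++ [(a, b)]) ch := by
  have ha0 : 0 ≤ a := hin.1
  have hb0 : 0 ≤ b := hin.2.2.1
  have hgv : pvGet g' a b = ch := by
    rw [h.1 a b ha0 hb0, if_neg hnm]; exact hv
  have hsh := pvGet_shape g' a b (by rw [hgv]; exact hch)
  constructor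
  · intro y x hy hx
    rw [pvGet_pvSet g' a b y x "D" hsh.1 hsh.2]
    by_cases he : (y, x) = (a, b)
    · have h1 : y = a ∧ x = b := by
        rw [Prod.ext_iff] at he; exact he
      rw [if_pos (by omega), if_pos (by simp [he])]
    · have hne : ¬ (y.toNat = a.toNat ∧ x.toNat = b.toNat) := by
        rw [Prod.ext_iff] at he
        push Not at he
        by_cases hya : y = a
        · intro ⟨_, hxb⟩; exact he hya (by omega)
        · intro ⟨hyn, _⟩; exact hya (by omega)
      rw [if_neg hne, h.1 y x hy hx]
      have : ((y, x) ∈ marks ++ [(a, b)]) ↔ (y, x) ∈ marks := by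
        simp [he]
      rw [if_congr this rfl rfl]
  · intro c hc
    rcases List.mem_append.1 hc with hc | hc
    · exact h.2 c hc
    · simp at hc
      subst hc
      exact ⟨hin, hv⟩

-- reading through Marked
theorem marked_get_ne (M N : Int) (base g' : List (List String)) (marks : List (Int × Int))
    (ch : String) (h : Marked M N base g' marks ch) (y x : Int) (hy : 0 ≤ y) (hx : 0 ≤ x)
    (v : String) (hv1 : v ≠ "D") (hv2 : v ≠ ch) :
    (pvGet g' y x = v ↔ pvGet base y x = v) := by
  rw [h.1 y x hy hx]
  by_cases hm : (y, x) ∈ marks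
  · rw [if_pos hm]
    have := (h.2 _ hm).2
    constructor
    · intro hd; exact absurd hd.symm hv1
    · intro hb; exact absurd (hb.symm.trans this) hv2
  · rw [if_neg hm]

theorem marked_get_ch (M N : Int) (base g' : List (List String)) (marks : List (Int × Int))
    (ch : String) (h : Marked M N base g' marks ch) (y x : Int) (hy : 0 ≤ y) (hx : 0 ≤ x)
    (hch : ch ≠ "D") :
    (pvGet g' y x = ch ↔ (y, x) ∉ marks ∧ pvGet base y x = ch) := by
  rw [h.1 y x hy hx]
  by_cases hm : (y, x) ∈ marks
  · simp only [if_pos hm]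
    constructor
    · intro hd; exact absurd hd.symm hch
    · intro hb; exact absurd hm hb.1
  · simp [hm]

-- A found a treasure while scanning level q / the cells A marks during that scan
def AFound (M N : Int) (g : List (List String)) (q : List (Int × Int)) : Prop :=
  ∃ p ∈ q, ∃ n ∈ nbrsB p.1 p.2, InB M N n.1 n.2 ∧ pvGet g n.1 n.2 = "X"

def AMark (M N : Int) (g : List (List String)) (q : List (Int × Int)) (m : Int × Int) : Prop :=
  ∃ p ∈ q, m ∈ nbrsB p.1 p.2 ∧ InB M N m.1 m.2 ∧ pvGet g m.1 m.2 = "O"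

theorem foldl_visA_found (M N y x : Int) (ds : List (Int × Int)) :
    List.foldl (visA M N y x) StA.found ds = StA.found := by
  induction ds with
  | nil => rfl
  | cons d t ih => simpa [visA] using ih

theorem foldl_cellA_found (M N : Int) (q : List (Int × Int)) :
    List.foldl (cellA M N) StA.found q = StA.found := by
  induction q with
  | nil => rfl
  | cons p t ih => simpa [cellA, foldl_visA_found] using ih

-- characterization of A's neighbour fold over an offset list
theorem exists_dir_iff (y x : Int) (P : Int → Int → Prop) :
    (∃ d ∈ dirListA, P (y + d.1) (x + d.2)) ↔ ∃ n ∈ nbrsB y x, P n.1 n.2 := by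
  simp only [dirListA, nbrsB, List.mem_cons, List.not_mem_nil, or_false]
  constructor
  · rintro ⟨d, hd, hP⟩
    rcases hd with h | h | h | h <;> subst h <;> simp at hP
    · exact ⟨(y+1, x), by simp, by simpa using hP⟩
    · exact ⟨(y-1, x), by simp, by rw [show y - 1 = y + -1 by ring]; simpa using hP⟩
    · exact ⟨(y, x+1), by simp, by simpa using hP⟩
    · exact ⟨(y, x-1), by simp, by rw [show x - 1 = x + -1 by ring]; simpa using hP⟩
  · rintro ⟨n, hn, hP⟩
    rcases hn with h | h | h | h <;> subst h <;> simp at hP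
    · exact ⟨(1,0), by simp, by simpa using hP⟩
    · exact ⟨(-1,0), by simp, by rw [show y + -1 = y - 1 by ring]; simpa using hP⟩
    · exact ⟨(0,1), by simp, by simpa using hP⟩
    · exact ⟨(0,-1), by simp, by rw [show x + -1 = x - 1 by ring]; simpa using hP⟩

-- characterization of A's level scan
def SimRel (M N : Int) (g0 gA : List (List String)) (q : List (Int × Int))
    (reached : PySem.Set (Int × Int)) : Prop :=
  (∀ y x : Int, 0 ≤ y → 0 ≤ x →
      pvGet gA y x = if (y, x) ∈ reached then "D" else pvGet g0 y x) ∧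
  (∀ p ∈ reached, InB M N p.1 p.2 ∧
      (pvGet g0 p.1 p.2 = "S" ∨ pvGet g0 p.1 p.2 = "O")) ∧
  (∀ p ∈ q, p ∈ reached) ∧
  (∀ p ∈ reached, p ∉ q → ∀ n ∈ nbrsB p.1 p.2, InB M N n.1 n.2 →
      (n ∈ reached ∨ (pvGet g0 n.1 n.2 ≠ "X" ∧ pvGet g0 n.1 n.2 ≠ "O")))

theorem foldvisA_spec' (M N y x : Int) (base : List (List String)) (ds : List (Int × Int)) :
    ∀ g' nq, Marked M N base g' nq "O" →
    ((∃ d ∈ ds, InB M N (y + d.1) (x + d.2) ∧ pvGet base (y + d.1) (x + d.2) = "X") →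
        List.foldl (visA M N y x) (StA.go g' nq) ds = StA.found) ∧
    (¬ (∃ d ∈ ds, InB M N (y + d.1) (x + d.2) ∧ pvGet base (y + d.1) (x + d.2) = "X") →
      ∃ g'' nq', List.foldl (visA M N y x) (StA.go g' nq) ds = StA.go g'' nq' ∧
        Marked M N base g'' nq' "O" ∧
        ∀ m, m ∈ nq' ↔ m ∈ nq ∨ ∃ d ∈ ds, m = (y + d.1, x + d.2) ∧
          InB M N m.1 m.2 ∧ pvGet base m.1 m.2 = "O") := by
      induction ds with
      | nil =>
        intro g' nq hM
        constructor
        · rintro ⟨d, hd, -⟩; simp at hd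
        · intro _; exact ⟨g', nq, rfl, hM, fun m => by simp⟩
      | cons d t ih =>
        intro g' nq hM
        by_cases hX : InB M N (y + d.1) (x + d.2) ∧ pvGet base (y + d.1) (x + d.2) = "X"
        · have hg'X : pvGet g' (y + d.1) (x + d.2) = "X" :=
            (marked_get_ne M N base g' nq "O" hM _ _ hX.1.1 hX.1.2.2.1 "X" (by decide) (by decide)).2 hX.2
          have hstep : visA M N y x (StA.go g' nq) d = StA.found := by
            simp only [visA]
            rw [if_pos (show 0 ≤ y + d.1 ∧ y + d.1 < M ∧ 0 ≤ x + d.2 ∧ x + d.2 < N from hX.1), if_pos hg'X]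
          rw [List.foldl_cons, hstep, foldl_visA_found]
          constructor
          · intro _; rfl
          · intro hnf; exact absurd ⟨d, List.mem_cons_self, hX⟩ hnf
        · have step : ∃ g2 nq2, visA M N y x (StA.go g' nq) d = StA.go g2 nq2 ∧ Marked M N base g2 nq2 "O" ∧ ∀ m, m ∈ nq2 ↔ m ∈ nq ∨ (m = (y + d.1, x + d.2) ∧ InB M N m.1 m.2 ∧ pvGet base m.1 m.2 = "O") := by
            by_cases hb : InB M N (y + d.1) (x + d.2)
            · have h0y : (0:Int) ≤ y + d.1 := hb.1
              have h0x : (0:Int) ≤ x + d.2 := hb.2.2.1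
              have hnX : pvGet g' (y + d.1) (x + d.2) ≠ "X" := by
                intro hc
                exact hX ⟨hb, (marked_get_ne M N base g' nq "O" hM _ _ h0y h0x "X" (by decide) (by decide)).1 hc⟩
              by_cases hO : pvGet g' (y + d.1) (x + d.2) = "O"
              · obtain ⟨hnm, hbase⟩ := (marked_get_ch M N base g' nq "O" hM _ _ h0y h0x (by decide)).1 hO
                refine ⟨_, _, ?_, marked_mark M N base g' nq "O" hM _ _ hb hbase hnm (by decide), ?_⟩
                · simp only [visA]
                  rw [if_pos (show 0 ≤ y + d.1 ∧ y + d.1 < M ∧ 0 ≤ x + d.2 ∧ x + d.2 < N from hb), if_neg hnX, if_pos hO]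
                · intro m
                  simp only [List.mem_append, List.mem_singleton]
                  constructor
                  · rintro (h | rfl)
                    · exact Or.inl h
                    · exact Or.inr ⟨rfl, hb, hbase⟩
                  · rintro (h | ⟨rfl, -, -⟩)
                    · exact Or.inl h
                    · exact Or.inr rfl
              · refine ⟨g', nq, ?_, hM, ?_⟩
                · simp only [visA]
                  rw [if_pos (show 0 ≤ y + d.1 ∧ y + d.1 < M ∧ 0 ≤ x + d.2 ∧ x + d.2 < N from hb), if_neg hnX, if_neg hO]
                · intro m
                  constructor
                  · exact Or.inl
                  · rintro (h | ⟨rfl, hInB, hbase⟩)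
                    · exact h
                    · by_cases hmm : ((y + d.1, x + d.2)) ∈ nq
                      · exact hmm
                      · exact absurd ((marked_get_ch M N base g' nq "O" hM _ _ h0y h0x (by decide)).2 ⟨hmm, hbase⟩) hO
            · refine ⟨g', nq, ?_, hM, ?_⟩
              · simp only [visA]
                rw [if_neg (show ¬(0 ≤ y + d.1 ∧ y + d.1 < M ∧ 0 ≤ x + d.2 ∧ x + d.2 < N) from hb)]
              · intro m
                constructor
                · exact Or.inl
                · rintro (h | ⟨rfl, hInB, -⟩)
                  · exact h
                  · exact absurd hInB hb
          obtain ⟨g2, nq2, hstep, hM2, hmem2⟩ := step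
          rw [List.foldl_cons, hstep]
          obtain ⟨ihf, ihg⟩ := ih g2 nq2 hM2
          constructor
          · rintro ⟨d', hd', hP⟩
            rcases List.mem_cons.1 hd' with rfl | hd'
            · exact absurd hP hX
            · exact ihf ⟨d', hd', hP⟩
          · intro hnf
            have hnt : ¬ ∃ d' ∈ t, InB M N (y + d'.1) (x + d'.2) ∧ pvGet base (y + d'.1) (x + d'.2) = "X" :=
              fun ⟨d', hd', hP⟩ => hnf ⟨d', List.mem_cons_of_mem _ hd', hP⟩
            obtain ⟨g'', nq', heq, hM'', hmem'⟩ := ihg hnt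
            refine ⟨g'', nq', heq, hM'', ?_⟩
            intro m
            rw [hmem' m, hmem2 m]
            constructor
            · rintro ((h | h) | ⟨d', hd', h⟩)
              · exact Or.inl h
              · exact Or.inr ⟨d, List.mem_cons_self, h⟩
              · exact Or.inr ⟨d', List.mem_cons_of_mem _ hd', h⟩
            · rintro (h | ⟨d', hd', h⟩)
              · exact Or.inl (Or.inl h)
              · rcases List.mem_cons.1 hd' with rfl | hd'
                · exact Or.inl (Or.inr h)
                · exact Or.inr ⟨d', hd', h⟩

theorem cellA_spec (M N : Int) (base : List (List String)) (p : Int × Int)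
    (g' : List (List String)) (nq : List (Int × Int)) (hM : Marked M N base g' nq "O") :
    ((∃ n ∈ nbrsB p.1 p.2, InB M N n.1 n.2 ∧ pvGet base n.1 n.2 = "X") →
        cellA M N (StA.go g' nq) p = StA.found) ∧
    (¬ (∃ n ∈ nbrsB p.1 p.2, InB M N n.1 n.2 ∧ pvGet base n.1 n.2 = "X") →
      ∃ g2 nq2, cellA M N (StA.go g' nq) p = StA.go g2 nq2 ∧ Marked M N base g2 nq2 "O" ∧
        ∀ m, m ∈ nq2 ↔ m ∈ nq ∨ (m ∈ nbrsB p.1 p.2 ∧ InB M N m.1 m.2 ∧ pvGet base m.1 m.2 = "O")) := by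
  obtain ⟨hf, hg⟩ := foldvisA_spec' M N p.1 p.2 base dirListA g' nq hM
  have hEX : (∃ d ∈ dirListA, InB M N (p.1 + d.1) (p.2 + d.2) ∧ pvGet base (p.1 + d.1) (p.2 + d.2) = "X")
      ↔ ∃ n ∈ nbrsB p.1 p.2, InB M N n.1 n.2 ∧ pvGet base n.1 n.2 = "X" :=
    exists_dir_iff p.1 p.2 (fun a b => InB M N a b ∧ pvGet base a b = "X")
  constructor
  · intro h
    exact hf (hEX.2 h)
  · intro h
    obtain ⟨g2, nq2, heq, hM2, hmem⟩ := hg (fun hc => h (hEX.1 hc))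
    refine ⟨g2, nq2, heq, hM2, fun m => ?_⟩
    rw [hmem m]
    have hEm : (∃ d ∈ dirListA, m = (p.1 + d.1, p.2 + d.2) ∧ InB M N m.1 m.2 ∧ pvGet base m.1 m.2 = "O")
        ↔ ∃ n ∈ nbrsB p.1 p.2, m = (n.1, n.2) ∧ InB M N m.1 m.2 ∧ pvGet base m.1 m.2 = "O" :=
      exists_dir_iff p.1 p.2 (fun a b => m = (a, b) ∧ InB M N m.1 m.2 ∧ pvGet base m.1 m.2 = "O")
    rw [hEm]
    constructor
    · rintro (h1 | ⟨n, hn, rfl, h2⟩)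
      · exact Or.inl h1
      · exact Or.inr ⟨hn, h2⟩
    · rintro (h1 | ⟨hn, h2⟩)
      · exact Or.inl h1
      · exact Or.inr ⟨m, hn, rfl, h2⟩

theorem foldcellA_spec' (M N : Int) (base : List (List String)) (q : List (Int × Int)) :
    ∀ g' nq, Marked M N base g' nq "O" →
    (AFound M N base q → List.foldl (cellA M N) (StA.go g' nq) q = StA.found) ∧
    (¬ AFound M N base q →
      ∃ g'' nq', List.foldl (cellA M N) (StA.go g' nq) q = StA.go g'' nq' ∧
        Marked M N base g'' nq' "O" ∧
        ∀ m, m ∈ nq' ↔ m ∈ nq ∨ AMark M N base q m) := by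
  induction q with
  | nil =>
    intro g' nq hM
    constructor
    · rintro ⟨p, hp, -⟩; simp at hp
    · intro _
      refine ⟨g', nq, rfl, hM, fun m => ?_⟩
      simp [AMark]
  | cons p qs ih =>
    intro g' nq hM
    obtain ⟨cf, cg⟩ := cellA_spec M N base p g' nq hM
    by_cases hX : ∃ n ∈ nbrsB p.1 p.2, InB M N n.1 n.2 ∧ pvGet base n.1 n.2 = "X"
    · rw [List.foldl_cons, cf hX, foldl_cellA_found]
      constructor
      · intro _; rfl
      · intro hnf
        exact absurd ⟨p, List.mem_cons_self, hX⟩ hnf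
    · obtain ⟨g2, nq2, hstep, hM2, hmem2⟩ := cg hX
      rw [List.foldl_cons, hstep]
      obtain ⟨ihf, ihg⟩ := ih g2 nq2 hM2
      constructor
      · rintro ⟨p', hp', hP⟩
        rcases List.mem_cons.1 hp' with rfl | hp'
        · exact absurd hP hX
        · exact ihf ⟨p', hp', hP⟩
      · intro hnf
        have hnt : ¬ AFound M N base qs :=
          fun ⟨p', hp', hP⟩ => hnf ⟨p', List.mem_cons_of_mem _ hp', hP⟩
        obtain ⟨g'', nq', heq, hM'', hmem'⟩ := ihg hnt
        refine ⟨g'', nq', heq, hM'', fun m => ?_⟩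
        rw [hmem' m, hmem2 m]
        constructor
        · rintro ((h | h) | ⟨p', hp', h⟩)
          · exact Or.inl h
          · exact Or.inr ⟨p, List.mem_cons_self, h⟩
          · exact Or.inr ⟨p', List.mem_cons_of_mem _ hp', h⟩
        · rintro (h | ⟨p', hp', h⟩)
          · exact Or.inl (Or.inl h)
          · rcases List.mem_cons.1 hp' with rfl | hp'
            · exact Or.inl (Or.inr h)
            · exact Or.inr ⟨p', hp', h⟩

theorem bHasNbr_iff' (M N : Int) (reached : PySem.Set (Int × Int)) (y x : Int) :
    bHasNbr M N reached y x = true ↔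
      ∃ n ∈ nbrsB y x, InB M N n.1 n.2 ∧ n ∈ reached := by
  unfold bHasNbr
  rw [List.any_eq_true]
  constructor
  · rintro ⟨n, hn, hb⟩
    rw [Bool.and_eq_true, decide_eq_true_iff, PySem.Set.contains_iff] at hb
    exact ⟨n, hn, hb.1, hb.2⟩
  · rintro ⟨n, hn, h1, h2⟩
    refine ⟨n, hn, ?_⟩
    rw [Bool.and_eq_true, decide_eq_true_iff, PySem.Set.contains_iff]
    exact ⟨h1, h2⟩

theorem foldl_bStep_fst (M N : Int) (g : List (List String)) (reached : PySem.Set (Int × Int))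
    (y : Int) (xs : List Int) : ∀ acc,
    ((xs.foldl (bStep M N g reached y) acc).1 = true ↔
      acc.1 = true ∨ ∃ x ∈ xs, pvGet g y x = "X" ∧ bHasNbr M N reached y x = true) := by
  induction xs with
  | nil => intro acc; simp
  | cons x t ih =>
    intro acc
    rw [List.foldl_cons, ih]
    have hstep : (bStep M N g reached y acc x).1 = true ↔
        (acc.1 = true ∨ (pvGet g y x = "X" ∧ bHasNbr M N reached y x = true)) := by
      simp only [bStep]
      split_ifs with h1 h2 h3
      · simp [h3, h2]
      · simp [h3]
      · simp [h2]
      · have hX : ¬ pvGet g y x = "X" := fun hc => h1 (Or.inl hc)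
        simp [hX]
    rw [hstep]
    constructor
    · rintro ((h | h) | ⟨x', hx', h⟩)
      · exact Or.inl h
      · exact Or.inr ⟨x, List.mem_cons_self, h⟩
      · exact Or.inr ⟨x', List.mem_cons_of_mem _ hx', h⟩
    · rintro (h | ⟨x', hx', h⟩)
      · exact Or.inl (Or.inl h)
      · rcases List.mem_cons.1 hx' with rfl | hx'
        · exact Or.inl (Or.inr h)
        · exact Or.inr ⟨x', hx', h⟩

theorem foldl_bStep_snd (M N : Int) (g : List (List String)) (reached : PySem.Set (Int × Int))
    (y : Int) (xs : List Int) : ∀ acc (m : Int × Int),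
    (m ∈ (xs.foldl (bStep M N g reached y) acc).2 ↔
      m ∈ acc.2 ∨ ∃ x ∈ xs, m = (y, x) ∧ pvGet g y x = "O" ∧ m ∉ reached ∧
        bHasNbr M N reached y x = true) := by
  induction xs with
  | nil => intro acc m; simp
  | cons x t ih =>
    intro acc m
    rw [List.foldl_cons, ih]
    have hstep : (m ∈ (bStep M N g reached y acc x).2 ↔
        m ∈ acc.2 ∨ (m = (y, x) ∧ pvGet g y x = "O" ∧ m ∉ reached ∧
          bHasNbr M N reached y x = true)) := by
      simp only [bStep]
      split_ifs with h1 h2 h3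
      · simp only []
        constructor
        · exact Or.inl
        · rintro (h | ⟨-, hO, -⟩)
          · exact h
          · exact absurd h3 (by simp [hO])
      · rw [List.mem_append, List.mem_singleton]
        rcases h1 with h1 | ⟨h1, h1'⟩
        · exact absurd h1 h3
        · constructor
          · rintro (h | rfl)
            · exact Or.inl h
            · refine Or.inr ⟨rfl, h1, ?_, h2⟩
              intro hmem
              have hc := (PySem.Set.contains_iff _ _).2 hmem
              rw [h1'] at hc
              exact absurd hc (by decide)
          · rintro (h | ⟨rfl, -, -, -⟩)
            · exact Or.inl h
            · exact Or.inr rfl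
      · constructor
        · exact Or.inl
        · rintro (h | ⟨rfl, hO, hnr, hN⟩)
          · exact h
          · exact absurd hN h2
      · constructor
        · exact Or.inl
        · rintro (h | ⟨rfl, hO, hnr, hN⟩)
          · exact h
          · refine absurd (Or.inr ⟨hO, ?_⟩) h1
            rw [Bool.eq_false_iff]
            intro hc
            exact hnr ((PySem.Set.contains_iff _ _).1 hc)
    rw [hstep]
    constructor
    · rintro ((h | h) | ⟨x', hx', h⟩)
      · exact Or.inl h
      · exact Or.inr ⟨x, List.mem_cons_self, h⟩
      · exact Or.inr ⟨x', List.mem_cons_of_mem _ hx', h⟩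
    · rintro (h | ⟨x', hx', h⟩)
      · exact Or.inl (Or.inl h)
      · rcases List.mem_cons.1 hx' with rfl | hx'
        · exact Or.inl (Or.inr h)
        · exact Or.inr ⟨x', hx', h⟩

theorem bRound_fst_iff' (M N : Int) (g : List (List String)) (reached : PySem.Set (Int × Int)) :
    (bRound M N g reached).1 = true ↔
      ∃ c : Int × Int, InB M N c.1 c.2 ∧ pvGet g c.1 c.2 = "X" ∧
        bHasNbr M N reached c.1 c.2 = true := by
  have houter : ∀ (ys : List Int) (acc : Bool × List (Int × Int)),
      ((ys.foldl (fun acc y => bRow M N g reached y acc) acc).1 = true ↔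
        acc.1 = true ∨ ∃ y ∈ ys, ∃ x ∈ PySem.List.pyRange 0 N 1,
          pvGet g y x = "X" ∧ bHasNbr M N reached y x = true) := by
    intro ys
    induction ys with
    | nil => intro acc; simp
    | cons y t ih =>
      intro acc
      rw [List.foldl_cons, ih]
      have hrow := foldl_bStep_fst M N g reached y (PySem.List.pyRange 0 N 1) acc
      rw [show bRow M N g reached y acc = ((PySem.List.pyRange 0 N 1).foldl (bStep M N g reached y) acc) from rfl, hrow]
      constructor
      · rintro ((h | ⟨x, hx, h⟩) | ⟨y', hy', h⟩)
        · exact Or.inl h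
        · exact Or.inr ⟨y, List.mem_cons_self, x, hx, h⟩
        · exact Or.inr ⟨y', List.mem_cons_of_mem _ hy', h⟩
      · rintro (h | ⟨y', hy', h⟩)
        · exact Or.inl (Or.inl h)
        · rcases List.mem_cons.1 hy' with rfl | hy'
          · exact Or.inl (Or.inr h)
          · exact Or.inr ⟨y', hy', h⟩
  unfold bRound
  rw [houter]
  simp only [Bool.false_eq_true, false_or]
  constructor
  · rintro ⟨y, hy, x, hx, h1, h2⟩
    rw [PySem.List.mem_pyRange_one] at hy hx
    exact ⟨(y, x), ⟨hy.1, by omega, hx.1, by omega⟩, h1, h2⟩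
  · rintro ⟨⟨y, x⟩, hin, h1, h2⟩
    exact ⟨y, PySem.List.mem_pyRange_one.2 ⟨hin.1, hin.2.1⟩,
      x, PySem.List.mem_pyRange_one.2 ⟨hin.2.2.1, hin.2.2.2⟩, h1, h2⟩

theorem bRound_snd_iff' (M N : Int) (g : List (List String)) (reached : PySem.Set (Int × Int))
    (m : Int × Int) :
    m ∈ (bRound M N g reached).2 ↔
      InB M N m.1 m.2 ∧ pvGet g m.1 m.2 = "O" ∧ m ∉ reached ∧
        bHasNbr M N reached m.1 m.2 = true := by
  have houter : ∀ (ys : List Int) (acc : Bool × List (Int × Int)),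
      (m ∈ (ys.foldl (fun acc y => bRow M N g reached y acc) acc).2 ↔
        m ∈ acc.2 ∨ ∃ y ∈ ys, ∃ x ∈ PySem.List.pyRange 0 N 1,
          m = (y, x) ∧ pvGet g y x = "O" ∧ m ∉ reached ∧ bHasNbr M N reached y x = true) := by
    intro ys
    induction ys with
    | nil => intro acc; simp
    | cons y t ih =>
      intro acc
      rw [List.foldl_cons, ih]
      have hrow := foldl_bStep_snd M N g reached y (PySem.List.pyRange 0 N 1) acc m
      rw [show bRow M N g reached y acc = ((PySem.List.pyRange 0 N 1).foldl (bStep M N g reached y) acc) from rfl, hrow]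
      constructor
      · rintro ((h | ⟨x, hx, h⟩) | ⟨y', hy', h⟩)
        · exact Or.inl h
        · exact Or.inr ⟨y, List.mem_cons_self, x, hx, h⟩
        · exact Or.inr ⟨y', List.mem_cons_of_mem _ hy', h⟩
      · rintro (h | ⟨y', hy', h⟩)
        · exact Or.inl (Or.inl h)
        · rcases List.mem_cons.1 hy' with rfl | hy'
          · exact Or.inl (Or.inr h)
          · exact Or.inr ⟨y', hy', h⟩
  unfold bRound
  rw [houter]
  simp only [List.not_mem_nil, false_or]
  constructor
  · rintro ⟨y, hy, x, hx, rfl, h1, h2, h3⟩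
    rw [PySem.List.mem_pyRange_one] at hy hx
    exact ⟨⟨hy.1, by omega, hx.1, by omega⟩, h1, h2, h3⟩
  · rintro ⟨hin, h1, h2, h3⟩
    exact ⟨m.1, PySem.List.mem_pyRange_one.2 ⟨hin.1, hin.2.1⟩,
      m.2, PySem.List.mem_pyRange_one.2 ⟨hin.2.2.1, hin.2.2.2⟩, rfl, h1, h2, h3⟩

theorem rel_found_iff' (M N : Int) (g0 gA : List (List String)) (q : List (Int × Int))
    (reached : PySem.Set (Int × Int)) (h : SimRel M N g0 gA q reached) :
    AFound M N gA q ↔ (bRound M N g0 reached).1 = true := by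
  obtain ⟨R1, R2, R2', R3⟩ := h
  rw [bRound_fst_iff' M N g0 reached]
  constructor
  · rintro ⟨p, hp, n, hn, hin, hX⟩
    have h0y : (0:Int) ≤ n.1 := hin.1
    have h0x : (0:Int) ≤ n.2 := hin.2.2.1
    have hAX := R1 n.1 n.2 h0y h0x
    rw [hX] at hAX
    have hnr : n ∉ reached := by
      intro hc
      rw [if_pos (by simpa using hc)] at hAX
      exact absurd hAX.symm (by decide)
    rw [if_neg (by simpa using hnr)] at hAX
    refine ⟨n, hin, hAX.symm, ?_⟩
    rw [bHasNbr_iff' M N reached n.1 n.2]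
    exact ⟨(p.1, p.2), by simpa using nbrsB_symm p.1 p.2 n hn, (R2 p (R2' p hp)).1, by simpa using R2' p hp⟩
  · rintro ⟨c, hin, hX, hnbr⟩
    rw [bHasNbr_iff' M N reached c.1 c.2] at hnbr
    obtain ⟨r, hr, hrin, hrmem⟩ := hnbr
    have hcnr : c ∉ reached := by
      intro hc
      rcases (R2 c hc).2 with hS | hO
      · rw [hX] at hS; exact absurd hS (by decide)
      · rw [hX] at hO; exact absurd hO (by decide)
    have hrq : r ∈ q := by
      by_contra hrq
      rcases R3 r hrmem hrq (c.1, c.2) (by simpa using nbrsB_symm c.1 c.2 r hr) (by simpa using hin) with hc | hc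
      · exact hcnr (by simpa using hc)
      · exact hc.1 (by simpa using hX)
    refine ⟨r, hrq, c, by simpa using nbrsB_symm c.1 c.2 r hr, hin, ?_⟩
    have hAX := R1 c.1 c.2 hin.1 hin.2.2.1
    rw [if_neg (by simpa using hcnr)] at hAX
    rw [hAX]
    exact hX

theorem rel_mark_iff' (M N : Int) (g0 gA : List (List String)) (q : List (Int × Int))
    (reached : PySem.Set (Int × Int)) (h : SimRel M N g0 gA q reached) (m : Int × Int) :
    AMark M N gA q m ↔ m ∈ (bRound M N g0 reached).2 := by
  obtain ⟨R1, R2, R2', R3⟩ := h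
  rw [bRound_snd_iff' M N g0 reached m]
  constructor
  · rintro ⟨p, hp, hmn, hin, hO⟩
    have hAO := R1 m.1 m.2 hin.1 hin.2.2.1
    rw [hO] at hAO
    have hnr : m ∉ reached := by
      intro hc
      rw [if_pos (by simpa using hc)] at hAO
      exact absurd hAO.symm (by decide)
    rw [if_neg (by simpa using hnr)] at hAO
    refine ⟨hin, hAO.symm, hnr, ?_⟩
    rw [bHasNbr_iff' M N reached m.1 m.2]
    exact ⟨(p.1, p.2), by simpa using nbrsB_symm p.1 p.2 m hmn, (R2 p (R2' p hp)).1, by simpa using R2' p hp⟩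
  · rintro ⟨hin, hO, hnr, hnbr⟩
    rw [bHasNbr_iff' M N reached m.1 m.2] at hnbr
    obtain ⟨r, hr, hrin, hrmem⟩ := hnbr
    have hrq : r ∈ q := by
      by_contra hrq
      rcases R3 r hrmem hrq (m.1, m.2) (by simpa using nbrsB_symm m.1 m.2 r hr) (by simpa using hin) with hc | hc
      · exact hnr (by simpa using hc)
      · exact hc.2 (by simpa using hO)
    refine ⟨r, hrq, by simpa using nbrsB_symm m.1 m.2 r hr, hin, ?_⟩
    have hAO := R1 m.1 m.2 hin.1 hin.2.2.1
    rw [if_neg (by simpa using hnr)] at hAO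
    rw [hAO]
    exact hO

theorem rel_next' (M N : Int) (g0 gA gA' : List (List String)) (q nq : List (Int × Int))
    (reached : PySem.Set (Int × Int)) (h : SimRel M N g0 gA q reached)
    (hnf : ¬ AFound M N gA q) (hM : Marked M N gA gA' nq "O")
    (hmem : ∀ m, m ∈ nq ↔ AMark M N gA q m) :
    SimRel M N g0 gA' nq (PySem.Set.update reached (bRound M N g0 reached).2) := by
  have hchain : ∀ m, m ∈ nq ↔ m ∈ (bRound M N g0 reached).2 :=
    fun m => (hmem m).trans (rel_mark_iff' M N g0 gA q reached h m)
  obtain ⟨R1, R2, R2', R3⟩ := h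
  refine ⟨?_, ?_, ?_, ?_⟩
  · intro y x hy hx
    rw [hM.1 y x hy hx]
    by_cases h1 : (y, x) ∈ nq
    · rw [if_pos h1, if_pos ((PySem.Set.mem_update _ _ _).2 (Or.inr ((hchain (y, x)).1 h1)))]
    · rw [if_neg h1, R1 y x hy hx]
      by_cases h2 : (y, x) ∈ reached
      · rw [if_pos h2, if_pos ((PySem.Set.mem_update _ _ _).2 (Or.inl h2))]
      · rw [if_neg h2, if_neg ?_]
        intro hc
        rcases (PySem.Set.mem_update _ _ _).1 hc with hc | hc
        · exact h2 hc
        · exact h1 ((hchain (y, x)).2 hc)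
  · intro p hp
    rcases (PySem.Set.mem_update _ _ _).1 hp with hp | hp
    · exact R2 p hp
    · obtain ⟨hin, hO, -, -⟩ := (bRound_snd_iff' M N g0 reached p).1 hp
      exact ⟨hin, Or.inr hO⟩
  · intro p hp
    exact (PySem.Set.mem_update _ _ _).2 (Or.inr ((hchain p).1 hp))
  · intro p hp hpq n hn hinB
    rcases (PySem.Set.mem_update _ _ _).1 hp with hpr | hpn
    · by_cases hpq0 : p ∈ q
      · by_cases hX : pvGet g0 n.1 n.2 = "X"
        · exfalso
          apply hnf
          have hnr : n ∉ reached := by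
            intro hc
            rcases (R2 n hc).2 with hS | hO
            · rw [hX] at hS; exact absurd hS (by decide)
            · rw [hX] at hO; exact absurd hO (by decide)
          have hAX := R1 n.1 n.2 hinB.1 hinB.2.2.1
          rw [if_neg (by simpa using hnr)] at hAX
          exact ⟨p, hpq0, n, hn, hinB, by rw [hAX]; exact hX⟩
        · by_cases hO : pvGet g0 n.1 n.2 = "O"
          · by_cases hnr : n ∈ reached
            · exact Or.inl ((PySem.Set.mem_update _ _ _).2 (Or.inl hnr))
            · refine Or.inl ((PySem.Set.mem_update _ _ _).2 (Or.inr ?_))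
              refine (bRound_snd_iff' M N g0 reached n).2 ⟨hinB, hO, hnr, ?_⟩
              rw [bHasNbr_iff' M N reached n.1 n.2]
              exact ⟨(p.1, p.2), by simpa using nbrsB_symm p.1 p.2 n hn, (R2 p hpr).1, by simpa using hpr⟩
          · exact Or.inr ⟨hX, hO⟩
      · rcases R3 p hpr hpq0 n hn hinB with hc | hc
        · exact Or.inl ((PySem.Set.mem_update _ _ _).2 (Or.inl hc))
        · exact Or.inr hc
    · exact absurd ((hchain p).2 hpn) hpq

theorem marked_nil (M N : Int) (g : List (List String)) (ch : String) : Marked M N g g [] ch :=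
  ⟨fun y x _ _ => by simp, fun c hc => by simp at hc⟩

theorem loop_eq' (M N : Int) (g0 : List (List String)) (k : Nat) :
    ∀ gA q reached cnt, countO gA = k → SimRel M N g0 gA q reached →
      loopA M N gA q cnt = loopB M N g0 reached cnt := by
  induction k using Nat.strong_induction_on with
  | _ k ih =>
    intro gA q reached cnt hk hRel
    cases q with
    | nil =>
      have hfst : ¬ (bRound M N g0 reached).1 = true := by
        intro hc
        obtain ⟨p, hp, -⟩ := (rel_found_iff' M N g0 gA [] reached hRel).2 hc
        simp at hp
      have hsnd : (bRound M N g0 reached).2 = [] := by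
        rw [List.eq_nil_iff_forall_not_mem]
        intro m hm
        obtain ⟨p, hp, -⟩ := (rel_mark_iff' M N g0 gA [] reached hRel m).2 hm
        simp at hp
      rw [loopA, loopB, if_neg hfst, if_pos (by simp)]
      simp [hsnd]
    | cons p qs =>
      obtain ⟨ff, fg⟩ := foldcellA_spec' M N gA (p :: qs) gA [] (marked_nil M N gA "O")
      rw [loopA, if_neg (by simp)]
      split
      · rename_i heq
        have hf : AFound M N gA (p :: qs) := by
          by_contra hnf
          obtain ⟨g'', nq', heq2, -, -⟩ := fg hnf
          rw [heq2] at heq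
          cases heq
        rw [loopB, if_pos ((rel_found_iff' M N g0 gA (p :: qs) reached hRel).1 hf)]
      · rename_i g' nq heq
        have hnf : ¬ AFound M N gA (p :: qs) := by
          intro hf
          rw [ff hf] at heq
          cases heq
        obtain ⟨g'', nq', heq2, hM2, hmem2⟩ := fg hnf
        rw [heq] at heq2
        injection heq2 with e1 e2
        subst e1
        subst e2
        have hmem' : ∀ m, m ∈ nq ↔ AMark M N gA (p :: qs) m := by
          intro m
          rw [hmem2 m]
          simp
        have hfst : ¬ (bRound M N g0 reached).1 = true :=
          fun hc => hnf ((rel_found_iff' M N g0 gA (p :: qs) reached hRel).2 hc)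
        by_cases hnq : nq = []
        · subst hnq
          have hsnd : (bRound M N g0 reached).2 = [] := by
            rw [List.eq_nil_iff_forall_not_mem]
            intro m hm
            exact absurd ((hmem' m).2 ((rel_mark_iff' M N g0 gA (p :: qs) reached hRel m).2 hm))
              (by simp)
          rw [loopB, if_neg hfst, if_pos (by simp [hsnd]), loopA]
          simp
        · have hsnd : ¬ (bRound M N g0 reached).2.isEmpty = true := by
            obtain ⟨m, hm⟩ := List.exists_mem_of_ne_nil _ hnq
            intro hc
            rw [List.isEmpty_iff] at hc
            have h4 := (rel_mark_iff' M N g0 gA (p :: qs) reached hRel m).1 ((hmem' m).1 hm)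
            rw [hc] at h4
            simp at h4
          rw [loopB, if_neg hfst, if_neg hsnd]
          have hlt : countO g' < k := by
            have h2 := level_meas M N (p :: qs) (StA.go gA [])
            rw [heq] at h2
            simp [measA] at h2
            have : nq.length ≠ 0 := by simpa using hnq
            omega
          exact ih (countO g') hlt g' nq _ (cnt + 1) rfl
            (rel_next' M N g0 gA g' (p :: qs) nq reached hRel hnf hM2 hmem')

theorem scanRow_spec (M N : Int) (g0 : List (List String)) (y : Int) (hy : 0 ≤ y ∧ y < M)
    (xs : List Int) : (∀ x ∈ xs, 0 ≤ x ∧ x < N) → ∀ g' acc, Marked M N g0 g' acc "S" →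
    ∃ g'' acc', xs.foldl (fun st x =>
        if pvGet st.1 y x = "S" then (pvSet st.1 y x "D", st.2 ++ [(y, x)]) else st) (g', acc)
      = (g'', acc') ∧ Marked M N g0 g'' acc' "S" ∧
      ∀ m, m ∈ acc' ↔ m ∈ acc ∨ ∃ x ∈ xs, m = (y, x) ∧ pvGet g0 y x = "S" := by
  induction xs with
  | nil =>
    intro _ g' acc hM
    exact ⟨g', acc, rfl, hM, fun m => by simp⟩
  | cons x t ih =>
    intro hxs g' acc hM
    rw [List.foldl_cons]
    by_cases hS : pvGet g' y x = "S"
    · obtain ⟨hnm, hbase⟩ := (marked_get_ch M N g0 g' acc "S" hM y x hy.1 (hxs x List.mem_cons_self).1 (by decide)).1 hS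
      rw [if_pos hS]
      have hin : InB M N y x := ⟨hy.1, hy.2, (hxs x List.mem_cons_self).1, (hxs x List.mem_cons_self).2⟩
      obtain ⟨g'', acc', heq, hM', hmem⟩ :=
        ih (fun z hz => hxs z (List.mem_cons_of_mem _ hz)) (pvSet g' y x "D") (acc ++ [(y, x)])
          (marked_mark M N g0 g' acc "S" hM y x hin hbase hnm (by decide))
      refine ⟨g'', acc', heq, hM', fun m => ?_⟩
      rw [hmem m, List.mem_append, List.mem_singleton]
      constructor
      · rintro ((h | rfl) | ⟨x', hx', h⟩)
        · exact Or.inl h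
        · exact Or.inr ⟨x, List.mem_cons_self, rfl, hbase⟩
        · exact Or.inr ⟨x', List.mem_cons_of_mem _ hx', h⟩
      · rintro (h | ⟨x', hx', h⟩)
        · exact Or.inl (Or.inl h)
        · rcases List.mem_cons.1 hx' with rfl | hx'
          · exact Or.inl (Or.inr h.1)
          · exact Or.inr ⟨x', hx', h⟩
    · rw [if_neg hS]
      obtain ⟨g'', acc', heq, hM', hmem⟩ :=
        ih (fun z hz => hxs z (List.mem_cons_of_mem _ hz)) g' acc hM
      refine ⟨g'', acc', heq, hM', fun m => ?_⟩
      rw [hmem m]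
      constructor
      · rintro (h | ⟨x', hx', h⟩)
        · exact Or.inl h
        · exact Or.inr ⟨x', List.mem_cons_of_mem _ hx', h⟩
      · rintro (h | ⟨x', hx', h⟩)
        · exact Or.inl h
        · rcases List.mem_cons.1 hx' with rfl | hx'
          · -- the head cell reads non-"S" in g', so it is already in acc
            by_cases hacc : m ∈ acc
            · exact Or.inl hacc
            · exfalso
              apply hS
              rw [h.1] at hacc
              exact (marked_get_ch M N g0 g' acc "S" hM y x' hy.1 (hxs x' List.mem_cons_self).1 (by decide)).2 ⟨hacc, h.2⟩
          · exact Or.inr ⟨x', hx', h⟩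

theorem scanA_spec (M N : Int) (g0 : List (List String)) (ys : List Int) :
    (∀ y ∈ ys, 0 ≤ y ∧ y < M) → ∀ g' acc, Marked M N g0 g' acc "S" →
    ∃ g'' acc', ys.foldl (fun st y => scanRowA N y st) (g', acc) = (g'', acc') ∧
      Marked M N g0 g'' acc' "S" ∧
      ∀ m, m ∈ acc' ↔ m ∈ acc ∨ ∃ y ∈ ys, ∃ x : Int, (0 ≤ x ∧ x < N) ∧ m = (y, x) ∧
        pvGet g0 y x = "S" := by
  induction ys with
  | nil =>
    intro _ g' acc hM
    exact ⟨g', acc, rfl, hM, fun m => by simp⟩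
  | cons y t ih =>
    intro hys g' acc hM
    rw [List.foldl_cons]
    obtain ⟨g2, acc2, heq2, hM2, hmem2⟩ :=
      scanRow_spec M N g0 y (hys y List.mem_cons_self) (PySem.List.pyRange 0 N 1)
        (fun x hx => by simpa using (PySem.List.mem_pyRange_one.1 hx)) g' acc hM
    rw [show scanRowA N y (g', acc) = (PySem.List.pyRange 0 N 1).foldl (fun st x =>
        if pvGet st.1 y x = "S" then (pvSet st.1 y x "D", st.2 ++ [(y, x)]) else st) (g', acc) from rfl,
      heq2]
    obtain ⟨g'', acc', heq, hM', hmem⟩ := ih (fun z hz => hys z (List.mem_cons_of_mem _ hz)) g2 acc2 hM2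
    refine ⟨g'', acc', heq, hM', fun m => ?_⟩
    rw [hmem m, hmem2 m]
    constructor
    · rintro ((h | ⟨x, hx, h1, h2⟩) | ⟨y', hy', h⟩)
      · exact Or.inl h
      · exact Or.inr ⟨y, List.mem_cons_self, x, by simpa using PySem.List.mem_pyRange_one.1 hx, h1, h2⟩
      · exact Or.inr ⟨y', List.mem_cons_of_mem _ hy', h⟩
    · rintro (h | ⟨y', hy', x, hx, h1, h2⟩)
      · exact Or.inl (Or.inl h)
      · rcases List.mem_cons.1 hy' with rfl | hy'
        · exact Or.inl (Or.inr ⟨x, PySem.List.mem_pyRange_one.2 (by omega), h1, h2⟩)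
        · exact Or.inr ⟨y', hy', x, hx, h1, h2⟩

theorem bInit_mem (M N : Int) (g : List (List String)) (m : Int × Int) :
    m ∈ bInit M N g ↔ ∃ y ∈ PySem.List.pyRange 0 M 1, ∃ x : Int, (0 ≤ x ∧ x < N) ∧
      m = (y, x) ∧ pvGet g y x = "S" := by
  have hinner : ∀ (y : Int) (xs : List Int) (s : PySem.Set (Int × Int)),
      m ∈ xs.foldl (fun s x => if pvGet g y x = "S" then PySem.Set.add s (y, x) else s) s ↔
        m ∈ s ∨ ∃ x ∈ xs, m = (y, x) ∧ pvGet g y x = "S" := by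
    intro y xs
    induction xs with
    | nil => intro s; simp
    | cons x t ih =>
      intro s
      rw [List.foldl_cons]
      by_cases hS : pvGet g y x = "S"
      · rw [if_pos hS, ih]
        rw [PySem.Set.mem_add]
        constructor
        · rintro ((h | rfl) | ⟨x', hx', h⟩)
          · exact Or.inl h
          · exact Or.inr ⟨x, List.mem_cons_self, rfl, hS⟩
          · exact Or.inr ⟨x', List.mem_cons_of_mem _ hx', h⟩
        · rintro (h | ⟨x', hx', h⟩)
          · exact Or.inl (Or.inl h)
          · rcases List.mem_cons.1 hx' with rfl | hx'
            · exact Or.inl (Or.inr h.1)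
            · exact Or.inr ⟨x', hx', h⟩
      · rw [if_neg hS, ih]
        constructor
        · rintro (h | ⟨x', hx', h⟩)
          · exact Or.inl h
          · exact Or.inr ⟨x', List.mem_cons_of_mem _ hx', h⟩
        · rintro (h | ⟨x', hx', h⟩)
          · exact Or.inl h
          · rcases List.mem_cons.1 hx' with rfl | hx'
            · exact absurd h.2 hS
            · exact Or.inr ⟨x', hx', h⟩
  have houter : ∀ (ys : List Int) (s : PySem.Set (Int × Int)),
      m ∈ ys.foldl (fun s y => (PySem.List.pyRange 0 N 1).foldl
          (fun s x => if pvGet g y x = "S" then PySem.Set.add s (y, x) else s) s) s ↔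
        m ∈ s ∨ ∃ y ∈ ys, ∃ x ∈ PySem.List.pyRange 0 N 1, m = (y, x) ∧ pvGet g y x = "S" := by
    intro ys
    induction ys with
    | nil => intro s; simp
    | cons y t ih =>
      intro s
      rw [List.foldl_cons, ih, hinner y]
      constructor
      · rintro ((h | ⟨x, hx, h1⟩) | ⟨y', hy', h⟩)
        · exact Or.inl h
        · exact Or.inr ⟨y, List.mem_cons_self, x, hx, h1⟩
        · exact Or.inr ⟨y', List.mem_cons_of_mem _ hy', h⟩
      · rintro (h | ⟨y', hy', h⟩)
        · exact Or.inl (Or.inl h)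
        · rcases List.mem_cons.1 hy' with rfl | hy'
          · exact Or.inl (Or.inr h)
          · exact Or.inr ⟨y', hy', h⟩
  unfold bInit
  rw [houter]
  simp only [PySem.Set.empty, List.not_mem_nil, false_or]
  constructor
  · rintro ⟨y, hy, x, hx, h⟩
    exact ⟨y, hy, x, by simpa using PySem.List.mem_pyRange_one.1 hx, h⟩
  · rintro ⟨y, hy, x, hx, h⟩
    exact ⟨y, hy, x, PySem.List.mem_pyRange_one.2 (by omega), h⟩

theorem init_rel' (matrix : List (List String)) :
    SimRel (matrix.length : Int) ((matrix.getD 0 []).length : Int) matrix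
      ((PySem.List.pyRange 0 (matrix.length : Int) 1).foldl
        (fun st y => scanRowA ((matrix.getD 0 []).length : Int) y st) (matrix, [])).1
      ((PySem.List.pyRange 0 (matrix.length : Int) 1).foldl
        (fun st y => scanRowA ((matrix.getD 0 []).length : Int) y st) (matrix, [])).2
      (bInit (matrix.length : Int) ((matrix.getD 0 []).length : Int) matrix) := by
  set M : Int := (matrix.length : Int) with hM
  set N : Int := ((matrix.getD 0 []).length : Int) with hN
  obtain ⟨g'', acc', heq, hMk, hmem⟩ :=
    scanA_spec M N matrix (PySem.List.pyRange 0 M 1)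
      (fun y hy => by simpa using PySem.List.mem_pyRange_one.1 hy) matrix [] (marked_nil M N matrix "S")
  rw [heq]
  have hiff : ∀ m : Int × Int, m ∈ acc' ↔ m ∈ bInit M N matrix := by
    intro m
    rw [hmem m, bInit_mem M N matrix m]
    simp
  refine ⟨?_, ?_, ?_, ?_⟩
  · intro y x hy hx
    rw [hMk.1 y x hy hx, if_congr (hiff (y, x)) rfl rfl]
  · intro p hp
    obtain ⟨y, hy, x, hx, rfl, hS⟩ := (bInit_mem M N matrix p).1 hp
    rw [PySem.List.mem_pyRange_one] at hy
    exact ⟨⟨hy.1, by omega, hx.1, hx.2⟩, Or.inl hS⟩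
  · intro p hp
    exact (hiff p).1 hp
  · intro p hp hpq
    exact absurd ((hiff p).2 hp) hpq


-- ===== VERDICT (by name: the statement is the Claim_ definition above) =====
theorem treasureIsland2_spec : Claim_equal_treasureIsland2 := by
  unfold Claim_equal_treasureIsland2
  intro matrix _ _
  unfold Spec_treasureIsland2 treasureIsland2 treasureIsland2_alt
  by_cases hm : matrix.isEmpty
  · simp [hm]
  · simp only [hm, Bool.false_eq_true, if_false]
    exact loop_eq' _ _ matrix _ _ _ _ _ rfl (init_rel' matrix)
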